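-- pv_equiv track=rewrite | github.com/WatchmakerLoL/technical_exercises | app.py | __check_for_status
-- ===== SOURCE A (Python) =====
-- def __check_for_status(list):
--     list_values = [value for value in list]
--     list_all_values = [value for elem in list_values for value in elem.values()]
--     # Conditionals to know which status the overall order is in.
--     if 'PENDING' in list_all_values:
--         return 'PENDING'
--     elif 'SHIPPED' in list_all_values:
--         return 'SHIPPED'
--     else:
--         return 'CANCELLED'
-- ===== SOURCE B (Python) =====
-- def __check_for_status(list):
--     shipped = False
--     for elem in list:
--         for value in elem.values():
--             if value == 'PENDING':
--                 return 'PENDING'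
--             if value == 'SHIPPED':
--                 shipped = True
--     return 'SHIPPED' if shipped else 'CANCELLED'
-- ===== Notes on version B (the rewrite author's own statement) =====
-- stated objective: alternative
-- what changed: Replaces building the flattened value list plus two full membership scans with a single short-circuiting pass that returns PENDING immediately and carries a shipped flag.
import Mathlib
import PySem

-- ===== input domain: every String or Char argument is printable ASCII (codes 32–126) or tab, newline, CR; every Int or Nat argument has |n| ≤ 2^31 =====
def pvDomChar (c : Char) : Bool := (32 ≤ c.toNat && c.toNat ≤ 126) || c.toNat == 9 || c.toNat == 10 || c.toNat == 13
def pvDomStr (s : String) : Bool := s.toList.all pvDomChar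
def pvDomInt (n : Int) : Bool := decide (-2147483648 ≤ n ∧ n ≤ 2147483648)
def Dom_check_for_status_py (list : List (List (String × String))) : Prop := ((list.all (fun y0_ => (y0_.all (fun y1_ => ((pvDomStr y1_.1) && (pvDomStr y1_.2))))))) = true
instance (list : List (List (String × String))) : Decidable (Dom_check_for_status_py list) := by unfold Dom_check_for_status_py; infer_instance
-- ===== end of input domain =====

-- B replaces the flattened value list and two membership scans with one short-circuiting
-- pass carrying a shipped flag (alternative decomposition, same asymptotic cost).


-- ===== PORT A =====
def check_for_status_py (list : List (List (String × String))) : String :=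
  let list_values := list.map (fun value => value)
  let list_all_values := (list_values.map (fun elem => (PySem.Dict.ofList elem).values)).flatten
  if list_all_values.contains "PENDING" then "PENDING"
  else if list_all_values.contains "SHIPPED" then "SHIPPED"
  else "CANCELLED"

-- ===== PORT B =====
-- inner loop over one dict's values: early return (.inr) or the updated flag (.inl)
def cfsScanVals : List String → Bool → Bool ⊕ String
  | [], flag => .inl flag
  | v :: vs, flag =>
    if v = "PENDING" then .inr "PENDING"
    else cfsScanVals vs (flag || v = "SHIPPED")

def cfsScanElems : List (List (String × String)) → Bool → String
  | [], flag => if flag then "SHIPPED" else "CANCELLED"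
  | e :: rest, flag =>
    match cfsScanVals (PySem.Dict.ofList e).values flag with
    | .inr s => s
    | .inl flag' => cfsScanElems rest flag'

def check_for_status_py_alt (list : List (List (String × String))) : String :=
  cfsScanElems list false

-- ===== PRECONDITION & SPEC =====
def Spec_check_for_status_py (list : List (List (String × String))) (out : String) : Prop := out = check_for_status_py_alt list
instance (list : List (List (String × String))) (out : String) : Decidable (Spec_check_for_status_py list out) := by unfold Spec_check_for_status_py; infer_instance

-- ===== CLAIM (what is proved, stated in full; the proofs are below) =====
def Claim_equal_check_for_status_py : Prop := ∀ (list : List (List (String × String))), Dom_check_for_status_py list → Spec_check_for_status_py list (check_for_status_py list)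

-- ===== LEMMAS AND PROOFS =====

theorem cfsScanVals_eq (vs : List String) (flag : Bool) :
    cfsScanVals vs flag =
      if vs.contains "PENDING" then .inr "PENDING"
      else .inl (flag || vs.contains "SHIPPED") := by
  induction vs generalizing flag with
  | nil => simp [cfsScanVals]
  | cons v vs ih =>
    simp only [cfsScanVals]
    by_cases hp : v = "PENDING"
    · simp [hp]
    · rw [ih]
      by_cases hm : "PENDING" ∈ vs
      · simp [hm, hp, Ne.symm hp]
      · by_cases hv : v = "SHIPPED"
        · simp [hm, hp, Ne.symm hp, hv]
        · simp [hm, hp, Ne.symm hp, hv, Ne.symm hv]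

theorem cfsScanElems_eq (l : List (List (String × String))) (flag : Bool) :
    cfsScanElems l flag =
      (let vals := (l.map (fun e => (PySem.Dict.ofList e).values)).flatten
       if vals.contains "PENDING" then "PENDING"
       else if flag || vals.contains "SHIPPED" then "SHIPPED" else "CANCELLED") := by
  induction l generalizing flag with
  | nil => simp [cfsScanElems]
  | cons e rest ih =>
    cases flag <;>
      by_cases hp : "PENDING" ∈ (PySem.Dict.ofList e).values <;>
      by_cases hr : "PENDING" ∈ (rest.map (fun e => (PySem.Dict.ofList e).values)).flatten <;>
      by_cases hs : "SHIPPED" ∈ (PySem.Dict.ofList e).values <;>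
        simp [cfsScanElems, cfsScanVals_eq, ih, hp, hr, hs]

-- ===== VERDICT (by name: the statement is the Claim_ definition above) =====
theorem check_for_status_py_spec : Claim_equal_check_for_status_py := by
  intro list _
  unfold Spec_check_for_status_py check_for_status_py check_for_status_py_alt
  rw [cfsScanElems_eq]
  simp
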